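-- pv_equiv track=rewrite | github.com/ema-tumova/streamlit-kalkulacka-podpory | streamlit_prod_app.py | vypocita_mesice_proc_schema
-- ===== SOURCE A (Python) =====
-- def vypocita_mesice_proc_schema(vek:int, vek_lim_1:int ,vek_lim_2:int, schema_perc:list, schema_mesice:list) -> list:
-- # Na základě věku vrátí seznam seznamů, které obsahují vždy číslo měsíce a procenta pro výpočet podpory za daný měsíc.
--     schema_podpory = []
--
--     if vek < vek_lim_1: # věk pod 1. limitem
--         for mesic,perc in zip(schema_mesice[0],schema_perc):
--             schema_podpory.extend(mesic*[perc])
--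
--     elif vek in range(vek_lim_1, vek_lim_2 + 1): # věk od 1. limitu do 2. limitu (včetně)
--         for mesic,perc in zip(schema_mesice[1],schema_perc):
--             schema_podpory.extend(mesic*[perc])
--
--     else: # věk nad 2. limitem
--         for mesic,perc in zip(schema_mesice[2],schema_perc):
--             schema_podpory.extend(mesic*[perc])
--     for poradi,polozka in enumerate(schema_podpory):
--         schema_podpory[poradi] = [poradi+1,polozka]
--
--     return schema_podpory
-- ===== SOURCE B (Python) =====
-- def vypocita_mesice_proc_schema(vek: int, vek_lim_1: int, vek_lim_2: int, schema_perc: list, schema_mesice: list) -> list: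
--     # Single pass: pick the bracket by index, then build the numbered entries for
--     # each (mesic, perc) run directly from a running month counter.
--     idx = 0 if vek < vek_lim_1 else (1 if vek <= vek_lim_2 else 2)
--     out = []
--     n = 0
--     for mesic, perc in zip(schema_mesice[idx], schema_perc):
--         if mesic > 0:
--             out.extend([i, perc] for i in range(n + 1, n + mesic + 1))
--             n += mesic
--     return out
-- ===== Notes on version B (the rewrite author's own statement) =====
-- stated objective: simpler
-- what changed: Collapses A's three duplicated branch loops into one bracket-index selection and fuses the build-then-renumber two-pass structure into a single pass that numbers entries with a running counter as it appends them.
-- outside the precondition, e.g. on vypocita_mesice_proc_schema(1, 5, 10, [60], []): A raises IndexError, B raises IndexError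
import Mathlib
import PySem

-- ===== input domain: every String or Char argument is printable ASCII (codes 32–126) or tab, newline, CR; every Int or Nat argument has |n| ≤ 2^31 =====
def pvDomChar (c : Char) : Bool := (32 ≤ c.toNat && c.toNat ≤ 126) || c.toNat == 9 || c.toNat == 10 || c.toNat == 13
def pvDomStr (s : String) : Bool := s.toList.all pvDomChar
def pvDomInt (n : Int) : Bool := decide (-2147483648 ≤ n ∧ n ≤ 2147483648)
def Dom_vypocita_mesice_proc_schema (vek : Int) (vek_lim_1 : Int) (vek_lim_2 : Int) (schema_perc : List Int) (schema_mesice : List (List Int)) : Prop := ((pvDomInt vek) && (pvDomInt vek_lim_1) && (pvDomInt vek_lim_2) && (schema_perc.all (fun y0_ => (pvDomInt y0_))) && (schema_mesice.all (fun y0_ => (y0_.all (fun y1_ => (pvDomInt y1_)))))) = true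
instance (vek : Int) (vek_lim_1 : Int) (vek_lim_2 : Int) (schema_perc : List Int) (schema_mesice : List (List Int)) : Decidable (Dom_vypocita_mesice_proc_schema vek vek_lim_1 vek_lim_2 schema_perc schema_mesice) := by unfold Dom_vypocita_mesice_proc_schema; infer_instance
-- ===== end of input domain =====

-- ===== PORT A =====
-- B collapses A's three duplicated loops into index selection and fuses A's
-- build-then-renumber two passes into one counting pass (objective: simpler).
def vypocita_mesice_proc_schema (vek : Int) (vek_lim_1 : Int) (vek_lim_2 : Int) (schema_perc : List Int) (schema_mesice : List (List Int)) : List (List Int) :=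
  -- three branches, each folding mesic*[perc] extensions (negative mesic extends nothing)
  let schema_podpory : List Int :=
    if vek < vek_lim_1 then
      (List.zip ((PySem.List.pyGet? schema_mesice 0).getD []) schema_perc).foldl
        (fun acc mp => acc ++ List.replicate mp.1.toNat mp.2) []
    else if vek_lim_1 ≤ vek ∧ vek < vek_lim_2 + 1 then  -- vek in range(vek_lim_1, vek_lim_2+1)
      (List.zip ((PySem.List.pyGet? schema_mesice 1).getD []) schema_perc).foldl
        (fun acc mp => acc ++ List.replicate mp.1.toNat mp.2) []
    else
      (List.zip ((PySem.List.pyGet? schema_mesice 2).getD []) schema_perc).foldl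
        (fun acc mp => acc ++ List.replicate mp.1.toNat mp.2) []
  -- for poradi, polozka in enumerate(schema_podpory): schema_podpory[poradi] = [poradi+1, polozka]
  (schema_podpory.zipIdx).map (fun q => [(q.2 : Int) + 1, q.1])

-- ===== PORT B =====
-- loop body: 'if mesic > 0: out.extend([i, perc] for i in range(n+1, n+mesic+1)); n += mesic'
def pvGoB : List (Int × Int) → Int → List (List Int) → List (List Int)
  | [], _, out => out
  | (mesic, perc) :: rest, n, out =>
      if 0 < mesic then
        pvGoB rest (n + mesic)
          (out ++ (PySem.List.pyRange (n + 1) (n + mesic + 1) 1).map (fun i => [i, perc]))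
      else pvGoB rest n out

def vypocita_mesice_proc_schema_alt (vek : Int) (vek_lim_1 : Int) (vek_lim_2 : Int) (schema_perc : List Int) (schema_mesice : List (List Int)) : List (List Int) :=
  let idx : Nat := if vek < vek_lim_1 then 0 else if vek ≤ vek_lim_2 then 1 else 2
  pvGoB (List.zip ((PySem.List.pyGet? schema_mesice idx).getD []) schema_perc) 0 []

-- ===== PRECONDITION & SPEC =====
-- Pre_ excludes exactly the inputs where Python A raises IndexError: the bracket
-- list it selects (index 0, 1 or 2 by age) does not exist in schema_mesice.
def Pre_vypocita_mesice_proc_schema (vek : Int) (vek_lim_1 : Int) (vek_lim_2 : Int) (schema_perc : List Int) (schema_mesice : List (List Int)) : Prop :=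
  (if vek < vek_lim_1 then 1 else if vek_lim_1 ≤ vek ∧ vek < vek_lim_2 + 1 then 2 else 3) ≤ schema_mesice.length
instance (vek : Int) (vek_lim_1 : Int) (vek_lim_2 : Int) (schema_perc : List Int) (schema_mesice : List (List Int)) : Decidable (Pre_vypocita_mesice_proc_schema vek vek_lim_1 vek_lim_2 schema_perc schema_mesice) := by unfold Pre_vypocita_mesice_proc_schema; infer_instance

def pvWitness_vypocita_mesice_proc_schema : Int × Int × Int × List Int × List (List Int) :=
  (3, 5, 10, [60, 50, 40], [[2, 1, 3], [1, 1], [1]])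

def Spec_vypocita_mesice_proc_schema (vek : Int) (vek_lim_1 : Int) (vek_lim_2 : Int) (schema_perc : List Int) (schema_mesice : List (List Int)) (out : List (List Int)) : Prop := out = vypocita_mesice_proc_schema_alt vek vek_lim_1 vek_lim_2 schema_perc schema_mesice
instance (vek : Int) (vek_lim_1 : Int) (vek_lim_2 : Int) (schema_perc : List Int) (schema_mesice : List (List Int)) (out : List (List Int)) : Decidable (Spec_vypocita_mesice_proc_schema vek vek_lim_1 vek_lim_2 schema_perc schema_mesice out) := by unfold Spec_vypocita_mesice_proc_schema; infer_instance

-- ===== CLAIM =====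
def Claim_equal_vypocita_mesice_proc_schema : Prop := ∀ (vek : Int) (vek_lim_1 : Int) (vek_lim_2 : Int) (schema_perc : List Int) (schema_mesice : List (List Int)), Dom_vypocita_mesice_proc_schema vek vek_lim_1 vek_lim_2 schema_perc schema_mesice → Pre_vypocita_mesice_proc_schema vek vek_lim_1 vek_lim_2 schema_perc schema_mesice → Spec_vypocita_mesice_proc_schema vek vek_lim_1 vek_lim_2 schema_perc schema_mesice (vypocita_mesice_proc_schema vek vek_lim_1 vek_lim_2 schema_perc schema_mesice)

-- ===== LEMMAS AND PROOFS =====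
-- A's flattened first pass, written structurally for the induction.
def pvFlat : List (Int × Int) → List Int
  | [] => []
  | (m, p) :: rest => List.replicate m.toNat p ++ pvFlat rest

lemma pvFoldl_flat (zs : List (Int × Int)) (acc : List Int) :
    zs.foldl (fun a mp => a ++ List.replicate mp.1.toNat mp.2) acc = acc ++ pvFlat zs := by
  induction zs generalizing acc with
  | nil => simp [pvFlat]
  | cons hd tl ih => cases hd; simp [pvFlat, List.foldl, ih]

lemma pvShift (xs : List Int) (j : Nat) (n : Int) :
    (xs.zipIdx j).map (fun q => [n + (q.2 : Int) + 1, q.1])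
      = xs.zipIdx.map (fun q => [n + (j : Int) + (q.2 : Int) + 1, q.1]) := by
  induction xs generalizing j n with
  | nil => simp
  | cons x xs ih =>
    simp only [List.zipIdx_cons, List.map_cons]
    rw [ih (j + 1) n, ih 1 (n + (j : Int))]
    refine congrArg₂ List.cons ?_ ?_
    · simp only [List.cons.injEq, and_true]; omega
    · apply List.map_congr_left
      intro q _
      simp only [List.cons.injEq, and_true]
      omega

lemma pvRun (k : Nat) (n p : Int) :
    (PySem.List.pyRange (n + 1) (n + (k : Int) + 1) 1).map (fun i => [i, p])
      = ((List.replicate k p).zipIdx).map (fun q => [n + (q.2 : Int) + 1, q.1]) := by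
  rw [PySem.List.pyRange_one]
  have hk : (n + (k : Int) + 1 - (n + 1)).toNat = k := by omega
  rw [hk, List.map_map]
  apply List.ext_getElem
  · simp
  · intro i h1 h2
    simp only [List.getElem_map, List.getElem_range, List.getElem_zipIdx,
      List.getElem_replicate, Function.comp_apply]
    simp only [List.cons.injEq, and_true]
    omega

lemma pvGoB_eq (zs : List (Int × Int)) (n : Int) (out : List (List Int)) :
    pvGoB zs n out = out ++ ((pvFlat zs).zipIdx).map (fun q => [n + (q.2 : Int) + 1, q.1]) := by
  induction zs generalizing n out with
  | nil => simp [pvGoB, pvFlat]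
  | cons hd tl ih =>
    obtain ⟨m, p⟩ := hd
    rw [pvGoB]
    by_cases hm : 0 < m
    · have hmt : ((m.toNat : Int)) = m := by omega
      rw [if_pos hm, ih, pvFlat]
      rw [List.zipIdx_append, List.map_append, List.append_assoc]
      have hrun := pvRun m.toNat n p
      rw [hmt] at hrun
      refine congrArg (out ++ ·) (congrArg₂ (· ++ ·) hrun ?_)
      rw [pvShift (pvFlat tl) (0 + (List.replicate m.toNat p).length) n]
      apply List.map_congr_left
      intro q _
      simp only [List.cons.injEq, and_true, List.length_replicate]
      omega
    · have hmt : m.toNat = 0 := by omega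
      rw [if_neg hm, ih, pvFlat, hmt]
      simp

theorem pv_main (vek vek_lim_1 vek_lim_2 : Int) (schema_perc : List Int) (schema_mesice : List (List Int)) :
    vypocita_mesice_proc_schema vek vek_lim_1 vek_lim_2 schema_perc schema_mesice
      = vypocita_mesice_proc_schema_alt vek vek_lim_1 vek_lim_2 schema_perc schema_mesice := by
  unfold vypocita_mesice_proc_schema vypocita_mesice_proc_schema_alt
  have key : ∀ (mes : List Int),
      ((List.zip mes schema_perc).foldl (fun acc mp => acc ++ List.replicate mp.1.toNat mp.2) []).zipIdx.map
        (fun q => [(q.2 : Int) + 1, q.1])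
      = pvGoB (List.zip mes schema_perc) 0 [] := by
    intro mes
    rw [pvGoB_eq, pvFoldl_flat]
    simp
  by_cases h1 : vek < vek_lim_1
  · simp only [h1, if_true]
    exact key _
  · by_cases h2 : vek_lim_1 ≤ vek ∧ vek < vek_lim_2 + 1
    · have h2' : vek ≤ vek_lim_2 := by omega
      simp only [h1, if_pos h2, h2', if_true]
      exact key _
    · have h2' : ¬ vek ≤ vek_lim_2 := by omega
      simp only [if_neg h1, if_neg h2, if_neg h2']
      exact key _

-- ===== VERDICT =====
theorem vypocita_mesice_proc_schema_spec : Claim_equal_vypocita_mesice_proc_schema := by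
  intro vek l1 l2 perc mes _ _
  exact pv_main vek l1 l2 perc mes
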